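-- pv_equiv track=rewrite | github.com/ngctombs/undp | raw_data/converter.py | dataXMLFilter
-- ===== SOURCE A (Python) =====
-- def dataXMLFilter (s):
-- 	undp2012str, temp = '<DocumentElement>', ''
-- 	keep = False
-- 	for x in s:
-- 		if x[:10] == '    <year>' :
-- 			if x[10:14] == '2012':
-- 				keep = True
-- 			else :
-- 				keep = False
--
-- 		if x[:8] == '  <Table':
-- 			if keep == True:
-- 				undp2012str += temp
-- 			keep = False
-- 			temp = ''
-- 		temp += x
-- 	undp2012str += '</DocumentElement>'
-- 	return undp2012str
-- ===== SOURCE B (Python) =====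
-- # Two-pass block decomposition: split lines into blocks at '  <Table' lines,
-- # then keep a block iff its last '    <year>' line says 2012; the final block
-- # is still open when the loop ends, so (like the original) it is not emitted.
-- def blockKeep(b):
--     keep = False
--     for x in b:
--         if x[:10] == '    <year>':
--             keep = x[10:14] == '2012'
--     return keep
--
-- def dataXMLFilter(s):
--     blocks = []
--     cur = []
--     for x in s:
--         if x[:8] == '  <Table':
--             blocks.append(cur)
--             cur = []
--         cur.append(x)
--     kept = [b for b in blocks if blockKeep(b)]
--     return '<DocumentElement>' + ''.join(''.join(b) for b in kept) + '</DocumentElement>'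
-- ===== Notes on version B (the rewrite author's own statement) =====
-- stated objective: alternative
-- what changed: Replaces the single stateful accumulator loop (running keep flag, pending temp buffer, in-place string += flush on each Table line) by a two-pass decomposition: first split the lines into blocks at ' <Table' lines, then keep each closed block iff its last year line reads 2012 and emit the kept blocks with one join.
import Mathlib
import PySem

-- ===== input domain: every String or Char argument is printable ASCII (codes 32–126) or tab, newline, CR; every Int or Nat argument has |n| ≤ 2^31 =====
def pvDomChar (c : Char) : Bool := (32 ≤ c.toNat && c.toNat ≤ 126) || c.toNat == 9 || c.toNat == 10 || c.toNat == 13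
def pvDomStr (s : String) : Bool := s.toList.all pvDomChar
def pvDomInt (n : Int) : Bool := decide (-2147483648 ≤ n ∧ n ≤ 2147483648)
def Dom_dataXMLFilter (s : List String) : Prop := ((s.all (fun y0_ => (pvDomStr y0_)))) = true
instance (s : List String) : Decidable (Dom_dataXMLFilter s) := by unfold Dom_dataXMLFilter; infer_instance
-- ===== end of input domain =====

-- B re-implements A by a two-pass block decomposition (split at '  <Table' lines, then
-- filter the closed blocks by their last year line); same value for every input.

-- ===== PORT A =====
-- one iteration of A's for-loop over state (undp2012str, temp, keep), on code points
def stepA (st : List Char × List Char × Bool) (x : String) : List Char × List Char × Bool :=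
  let keep := if PySem.List.slice x.toList none (some 10) = "    <year>".toList then
      decide (PySem.List.slice x.toList (some 10) (some 14) = "2012".toList)
    else st.2.2
  if PySem.List.slice x.toList none (some 8) = "  <Table".toList then
    ((if keep then st.1 ++ st.2.1 else st.1), x.toList, false)   -- flush if keep, temp reset then x appended
  else (st.1, st.2.1 ++ x.toList, keep)

def dataXMLFilter (s : List String) : String :=
  let st := s.foldl stepA ("<DocumentElement>".toList, [], false)
  String.ofList (st.1 ++ "</DocumentElement>".toList)

-- ===== PORT B =====
-- blockKeep from Source B: the last '    <year>' line of the block decides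
def blockKeep (b : List String) : Bool :=
  b.foldl (fun k x =>
    if PySem.List.slice x.toList none (some 10) = "    <year>".toList then
      decide (PySem.List.slice x.toList (some 10) (some 14) = "2012".toList)
    else k) false

-- one iteration of Source B's splitting loop over state (blocks, cur)
def stepB (p : List (List String) × List String) (x : String) : List (List String) × List String :=
  if PySem.List.slice x.toList none (some 8) = "  <Table".toList then
    (p.1 ++ [p.2], [x])
  else (p.1, p.2 ++ [x])

def dataXMLFilter_alt (s : List String) : String :=
  let p := s.foldl stepB ([], [])
  let kept := p.1.filter blockKeep
  String.ofList ("<DocumentElement>".toList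
    ++ (kept.map (fun b => (b.map String.toList).flatten)).flatten
    ++ "</DocumentElement>".toList)

-- ===== PRECONDITION & SPEC =====
def Spec_dataXMLFilter (s : List String) (out : String) : Prop := out = dataXMLFilter_alt s
instance (s : List String) (out : String) : Decidable (Spec_dataXMLFilter s out) := by unfold Spec_dataXMLFilter; infer_instance

-- ===== CLAIM (what is proved, stated in full; the proofs are below) =====
def Claim_equal_dataXMLFilter : Prop := ∀ (s : List String), Dom_dataXMLFilter s → Spec_dataXMLFilter s (dataXMLFilter s)

-- ===== LEMMAS AND PROOFS =====

-- join of a block's lines as code points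
def Jn (b : List String) : List Char := (b.map String.toList).flatten

theorem Jn_append_single (b : List String) (x : String) : Jn (b ++ [x]) = Jn b ++ x.toList := by
  simp [Jn]

theorem blockKeep_append_single (b : List String) (x : String) :
    blockKeep (b ++ [x]) =
      (if PySem.List.slice x.toList none (some 10) = "    <year>".toList then
        decide (PySem.List.slice x.toList (some 10) (some 14) = "2012".toList)
      else blockKeep b) := by
  unfold blockKeep
  rw [List.foldl_append, List.foldl_cons, List.foldl_nil]

-- a line cannot start with both '    <year>' and '  <Table'
theorem not_year_and_table (x : String)
    (hY : PySem.List.slice x.toList none (some 10) = "    <year>".toList)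
    (hT : PySem.List.slice x.toList none (some 8) = "  <Table".toList) : False := by
  simp [PySem.List.slice_to] at hY hT
  have h : (x.toList.take 10).take 8 = x.toList.take 8 := by
    simp [List.take_take]
  rw [hY, hT] at h
  simp at h

-- Source B's splitting fold: the starting block list is only a prefix
theorem foldB_shift (s : List String) : ∀ (bs : List (List String)) (cur : List String),
    s.foldl stepB (bs, cur) = (bs ++ (s.foldl stepB ([], cur)).1, (s.foldl stepB ([], cur)).2) := by
  induction s with
  | nil => intro bs cur; simp
  | cons x s ih =>
    intro bs cur
    simp only [List.foldl_cons]
    by_cases hT : PySem.List.slice x.toList none (some 8) = "  <Table".toList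
    · rw [show stepB (bs, cur) x = (bs ++ [cur], [x]) from by unfold stepB; rw [if_pos hT],
        show stepB (([] : List (List String)), cur) x = ([cur], [x]) from by unfold stepB; rw [if_pos hT]; rfl,
        ih (bs ++ [cur]) [x], ih [cur] [x]]
      simp
    · rw [show stepB (bs, cur) x = (bs, cur ++ [x]) from by unfold stepB; rw [if_neg hT],
        show stepB (([] : List (List String)), cur) x = ([], cur ++ [x]) from by unfold stepB; rw [if_neg hT]]
      exact ih bs (cur ++ [x])

-- main loop invariant: A's fold from (acc, join cur, blockKeep cur) equals acc extended by
-- the kept blocks that B's fold closes, with B's open block as the pending buffer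
theorem loop_eq (s : List String) : ∀ (acc : List Char) (cur : List String),
    s.foldl stepA (acc, Jn cur, blockKeep cur)
      = (acc ++ (((s.foldl stepB ([], cur)).1.filter blockKeep).map Jn).flatten,
         Jn (s.foldl stepB ([], cur)).2, blockKeep (s.foldl stepB ([], cur)).2) := by
  induction s with
  | nil => intro acc cur; simp
  | cons x s ih =>
    intro acc cur
    simp only [List.foldl_cons]
    by_cases hT : PySem.List.slice x.toList none (some 8) = "  <Table".toList
    · by_cases hY : PySem.List.slice x.toList none (some 10) = "    <year>".toList
      · exact (not_year_and_table x hY hT).elim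
      · have hA : stepA (acc, Jn cur, blockKeep cur) x
            = ((if blockKeep cur then acc ++ Jn cur else acc), x.toList, false) := by
          unfold stepA
          rw [if_pos hT, if_neg hY]
        have hB : stepB (([] : List (List String)), cur) x = ([cur], [x]) := by
          unfold stepB; rw [if_pos hT]; rfl
        have hk : blockKeep [x] = false := by
          unfold blockKeep
          rw [List.foldl_cons, List.foldl_nil, if_neg hY]
        have hj : Jn [x] = x.toList := by simp [Jn]
        rw [hA, hB, ← hj, ← hk, ih _ [x], foldB_shift s [cur] [x]]
        by_cases hk2 : blockKeep cur <;>
          simp [hk2, List.append_assoc]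
    · have hA : stepA (acc, Jn cur, blockKeep cur) x
          = (acc, Jn cur ++ x.toList,
             if PySem.List.slice x.toList none (some 10) = "    <year>".toList then
               decide (PySem.List.slice x.toList (some 10) (some 14) = "2012".toList)
             else blockKeep cur) := by
        unfold stepA; rw [if_neg hT]
      have hB : stepB (([] : List (List String)), cur) x = ([], cur ++ [x]) := by
        unfold stepB; rw [if_neg hT]
      rw [hA, ← Jn_append_single, ← blockKeep_append_single, hB]
      exact ih acc (cur ++ [x])

-- ===== VERDICT (by name: the statement is the Claim_ definition above) =====
theorem dataXMLFilter_spec : Claim_equal_dataXMLFilter := by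
  intro s _
  unfold Spec_dataXMLFilter dataXMLFilter dataXMLFilter_alt
  have h := loop_eq s "<DocumentElement>".toList []
  simp only [show Jn [] = [] from rfl, show blockKeep [] = false from rfl] at h
  rw [h]
  rw [show (fun (b : List String) => (b.map String.toList).flatten) = Jn from rfl]
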